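-- pv_equiv track=rewrite | github.com/PaumIsMe/3LinesSolver | script.py | calculate_minimum_essence_time
-- ===== SOURCE A (Python) =====
-- def calculate_minimum_essence_time(consumable_times, extras_needed):
--     INF = 10**10
--
--     # Only care up to extras_needed
--     dp = [INF] * (extras_needed + 1)
--     dp[0] = 0
--
--     for _, time, reward in consumable_times:
--         for r in range(extras_needed, -1, -1):
--             if dp[r] == INF:
--                 continue
--             new_r = min(extras_needed, r + reward)
--             new_time = dp[r] + time
--             if new_time < dp[new_r]:
--                 dp[new_r] = new_time
--
--     return dp[extras_needed]
-- ===== SOURCE B (Python) =====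
-- def calculate_minimum_essence_time(consumable_times, extras_needed):
--     INF = 10 ** 10
--     memo = {}
--
--     def best(i, r):
--         # minimum extra time using consumable_times[i:] to push the capped
--         # accumulated reward r up to extras_needed (INF if impossible)
--         if i == len(consumable_times):
--             return 0 if r == extras_needed else INF
--         if (i, r) in memo:
--             return memo[(i, r)]
--         _, time, reward = consumable_times[i]
--         skip = best(i + 1, r)
--         take = best(i + 1, min(extras_needed, r + reward))
--         res = min(skip, take + time) if take < INF else skip
--         memo[(i, r)] = res
--         return res
--
--     return best(0, 0)
-- ===== Notes on version B (the rewrite author's own statement) =====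
-- stated objective: alternative
-- what changed: Replaces the bottom-up in-place array DP (a descending index sweep over dp[0..extras_needed] per item) by top-down memoized recursion over the item index: best(i,r) = minimal additional time using consumables[i:] to lift the capped reward r to extras_needed, memoized on (i,r), answer best(0,0).
-- outside the precondition, e.g. on calculate_minimum_essence_time([(0, 5, -1)], 3): A returns 5, B returns 10000000000; on calculate_minimum_essence_time([], -1): A raises IndexError, B returns 10000000000
import Mathlib
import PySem

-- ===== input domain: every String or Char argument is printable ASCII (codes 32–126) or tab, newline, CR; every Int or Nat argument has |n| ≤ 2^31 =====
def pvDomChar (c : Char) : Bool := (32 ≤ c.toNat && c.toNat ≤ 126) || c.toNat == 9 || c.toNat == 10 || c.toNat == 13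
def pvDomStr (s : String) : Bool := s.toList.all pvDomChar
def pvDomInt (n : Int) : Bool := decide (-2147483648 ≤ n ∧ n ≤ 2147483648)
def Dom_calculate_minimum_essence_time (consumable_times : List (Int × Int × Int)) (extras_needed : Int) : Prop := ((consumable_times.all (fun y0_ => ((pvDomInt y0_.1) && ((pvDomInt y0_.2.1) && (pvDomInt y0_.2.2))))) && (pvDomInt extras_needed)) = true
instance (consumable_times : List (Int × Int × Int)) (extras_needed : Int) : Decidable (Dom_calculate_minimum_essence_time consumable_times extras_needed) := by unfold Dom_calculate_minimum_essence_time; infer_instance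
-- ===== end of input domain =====

-- B replaces A's bottom-up in-place array DP (descending index sweep per item) by top-down
-- memoized recursion over the item index (alternative decomposition; no speed claim).


-- ===== PORT A =====
-- literal transliteration of A: dp array [INF]*(e+1), dp[0]=0, per item an in-place
-- descending sweep r = e..0 (pySetD/pyGetD are exact for the in-range indices Pre_ admits)
def calculate_minimum_essence_time (consumable_times : List (Int × Int × Int)) (extras_needed : Int) : Int :=
  let INF : Int := 10 ^ 10
  let dp : List Int := PySem.List.pySetD (PySem.List.pyRepeat [INF] (extras_needed + 1)) 0 0
  let dp : List Int := consumable_times.foldl (fun dp item =>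
    (PySem.List.pyRange extras_needed (-1) (-1)).foldl (fun dp r =>
      if PySem.List.pyGetD dp r 0 == INF then dp
      else
        let new_r := min extras_needed (r + item.2.2)
        let new_time := PySem.List.pyGetD dp r 0 + item.2.1
        if new_time < PySem.List.pyGetD dp new_r 0 then PySem.List.pySetD dp new_r new_time
        else dp) dp) dp
  PySem.List.pyGetD dp extras_needed 0

-- ===== PORT B =====
-- literal transliteration of Source B: best(i, r) = minimal additional time using
-- consumable_times[i:] to lift the capped reward r to extras_needed, memoized on (i, r)
-- (the memo dict is threaded through the recursion; i takes values 0..len only, so Nat is exact)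
def pvBestB (ct : List (Int × Int × Int)) (e INF : Int) (i : Nat) (r : Int)
    (memo : PySem.Dict (Nat × Int) Int) : Int × PySem.Dict (Nat × Int) Int :=
  if h : i < ct.length then
    match memo.get? (i, r) with
    | some v => (v, memo)
    | none =>
      let item := ct[i]
      let p1 := pvBestB ct e INF (i + 1) r memo
      let p2 := pvBestB ct e INF (i + 1) (min e (r + item.2.2)) p1.2
      let res := if p2.1 < INF then min p1.1 (p2.1 + item.2.1) else p1.1
      (res, p2.2.insert (i, r) res)
  else
    ((if r == e then 0 else INF), memo)
termination_by ct.length - i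
decreasing_by all_goals omega

def calculate_minimum_essence_time_alt (consumable_times : List (Int × Int × Int)) (extras_needed : Int) : Int :=
  let INF : Int := 10 ^ 10
  (pvBestB consumable_times extras_needed INF 0 0 PySem.Dict.empty).1

-- ===== PRECONDITION & SPEC =====
-- Pre_ excludes: negative extras_needed, where A raises IndexError (dp is empty at dp[0] = 0);
-- items with negative reward, outside the natural domain of reward-collecting consumables, on
-- which A's descending in-place sweep both re-applies an item within one pass and indexes dp
-- negatively, wrapping to the top cells — accidental behaviour no caller would specify; and
-- inputs whose total |time| reaches the sentinel INF = 10^10 that both programs use to mark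
-- "unreachable", where any result is an artifact of the sentinel colliding with genuine costs.
def Pre_calculate_minimum_essence_time (consumable_times : List (Int × Int × Int)) (extras_needed : Int) : Prop :=
  0 ≤ extras_needed ∧ (∀ p ∈ consumable_times, 0 ≤ p.2.2) ∧
    (consumable_times.map (fun p => |p.2.1|)).sum < 10 ^ 10
instance (consumable_times : List (Int × Int × Int)) (extras_needed : Int) : Decidable (Pre_calculate_minimum_essence_time consumable_times extras_needed) := by unfold Pre_calculate_minimum_essence_time; infer_instance

def pvWitness_calculate_minimum_essence_time : (List (Int × Int × Int)) × Int := ([(1, 2, 3)], 2)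

def Spec_calculate_minimum_essence_time (consumable_times : List (Int × Int × Int)) (extras_needed : Int) (out : Int) : Prop := out = calculate_minimum_essence_time_alt consumable_times extras_needed
instance (consumable_times : List (Int × Int × Int)) (extras_needed : Int) (out : Int) : Decidable (Spec_calculate_minimum_essence_time consumable_times extras_needed out) := by unfold Spec_calculate_minimum_essence_time; infer_instance

-- ===== CLAIM (what is proved, stated in full; the proofs are below) =====
def Claim_equal_calculate_minimum_essence_time : Prop := ∀ (consumable_times : List (Int × Int × Int)) (extras_needed : Int), Dom_calculate_minimum_essence_time consumable_times extras_needed → Pre_calculate_minimum_essence_time consumable_times extras_needed → Spec_calculate_minimum_essence_time consumable_times extras_needed (calculate_minimum_essence_time consumable_times extras_needed)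

-- ===== LEMMAS AND PROOFS =====

-- ---- shared notions ----
def pvINF : Int := 10 ^ 10
def pvS (l : List (Int × Int × Int)) : Int := (l.map (fun p => |p.2.1|)).sum

def pvOmin : Option Int → Option Int → Option Int
  | none, b => b
  | some x, none => some x
  | some x, some y => some (min x y)

-- exact min-cost function: pvM e items r = minimal total time of a subset of items that lifts
-- the capped accumulated reward from r to e (none = impossible)
def pvM (e : Int) : List (Int × Int × Int) → Int → Option Int
  | [], r => if r = e then some 0 else none
  | it :: rest, r => pvOmin (pvM e rest r) ((pvM e rest (min e (r + it.2.2))).map (· + it.2.1))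

def pvOadd : Option Int → Option Int → Option Int
  | some x, some y => some (x + y)
  | _, _ => none

def pvOminL (l : List (Option Int)) : Option Int := l.foldr pvOmin none

def pvRen (o : Option Int) : Int := o.getD pvINF

-- ---- A-side characterisation of the in-place descending sweep ----
def pvGetf (dp : List Int) (x : Int) : Int := PySem.List.pyGetD dp x 0
def pvG (dp : List Int) (x : Int) : Option Int :=
  if pvGetf dp x = pvINF then none else some (pvGetf dp x)
def pvStep (e w t x : Int) (acc : Int) (p : Int × Int) : Int :=
  if min e (p.1 + w) = x then min acc (p.2 + t) else acc
def pvMstep (e w t : Int) (L : List (Int × Int)) (f : Int → Int) (x : Int) : Int :=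
  L.foldl (pvStep e w t x) (f x)
def pvOstep (e w t x : Int) (acc : Option Int) (p : Int × Int) : Option Int :=
  if min e (p.1 + w) = x then pvOmin acc (some (p.2 + t)) else acc
def pvLA (dp : List Int) (a : Int) : List (Int × Int) :=
  (PySem.List.pyRange a (-1) (-1)).filterMap
    (fun r => if pvGetf dp r = pvINF then none else some (r, pvGetf dp r))

-- the "meet": value of the whole computation = min over reachable states x of
-- (cost so far dp[x]) + (best completion using the remaining items)
def pvAns (e : Int) (rest : List (Int × Int × Int)) (dp : List Int) : Option Int :=
  pvOminL ((PySem.List.pyRange e (-1) (-1)).map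
    (fun x => pvOadd (pvG dp x) (pvM e rest x)))

theorem pv_getf_set (e : Int) (dp : List Int) (hlen : dp.length = (e + 1).toNat)
    (nr : Int) (h1 : 0 ≤ nr) (h2 : nr ≤ e) (v x : Int) (hx1 : 0 ≤ x) (hx2 : x ≤ e) :
    pvGetf (PySem.List.pySetD dp nr v) x = if x = nr then v else pvGetf dp x := by
  unfold pvGetf
  rw [PySem.List.pySetD_of_nonneg _ _ h1]
  rw [PySem.List.pyGetD_eq_getElem _ _ hx1 (by simp [hlen]; omega),
      PySem.List.pyGetD_eq_getElem _ _ hx1 (by rw [hlen]; omega)]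
  rw [List.getElem_set]
  by_cases hx : x = nr
  · rw [if_pos (by omega), if_pos hx]
  · rw [if_neg (by omega), if_neg hx]

theorem pv_a_round (e w t : Int) (hw : 0 ≤ w) (n : Nat) (hn : (n : Int) ≤ e + 1)
    (dp : List Int) (hlen : dp.length = (e + 1).toNat) :
    ((PySem.List.pyRange ((n : Int) - 1) (-1) (-1)).foldl (fun dp r =>
      if PySem.List.pyGetD dp r 0 == pvINF then dp
      else
        if PySem.List.pyGetD dp r 0 + t < PySem.List.pyGetD dp (min e (r + w)) 0
        then PySem.List.pySetD dp (min e (r + w)) (PySem.List.pyGetD dp r 0 + t)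
        else dp) dp).length = (e + 1).toNat ∧
    ∀ x, 0 ≤ x → x ≤ e →
      pvGetf ((PySem.List.pyRange ((n : Int) - 1) (-1) (-1)).foldl (fun dp r =>
        if PySem.List.pyGetD dp r 0 == pvINF then dp
        else
          if PySem.List.pyGetD dp r 0 + t < PySem.List.pyGetD dp (min e (r + w)) 0
          then PySem.List.pySetD dp (min e (r + w)) (PySem.List.pyGetD dp r 0 + t)
          else dp) dp) x
      = pvMstep e w t (pvLA dp ((n : Int) - 1)) (pvGetf dp) x := by
  induction n generalizing dp with
  | zero =>
    rw [PySem.List.pyRange_neg_one_eq_nil (by norm_num)]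
    refine ⟨hlen, fun x _ _ => ?_⟩
    simp [pvLA, pvMstep]
  | succ n ih =>
    have hcast : ((n + 1 : Nat) : Int) - 1 = (n : Int) := by push_cast; ring
    rw [hcast]
    rw [PySem.List.pyRange_neg_one_cons (by omega)]
    simp only [List.foldl_cons]
    have hne : 0 ≤ (n : Int) := by positivity
    have hnle : (n : Int) ≤ e := by omega
    by_cases h0 : pvGetf dp (n : Int) = pvINF
    · have hbody : (if PySem.List.pyGetD dp (n : Int) 0 == pvINF then dp
        else if PySem.List.pyGetD dp (n : Int) 0 + t < PySem.List.pyGetD dp (min e ((n : Int) + w)) 0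
          then PySem.List.pySetD dp (min e ((n : Int) + w)) (PySem.List.pyGetD dp (n : Int) 0 + t)
          else dp) = dp := by
        rw [if_pos (by simpa [pvGetf] using h0)]
      rw [hbody]
      obtain ⟨ih1, ih2⟩ := ih (by omega) dp hlen
      refine ⟨ih1, fun x hx1 hx2 => ?_⟩
      rw [ih2 x hx1 hx2]
      have : pvLA dp (n : Int) = pvLA dp ((n : Int) - 1) := by
        unfold pvLA
        rw [PySem.List.pyRange_neg_one_cons (by omega), List.filterMap_cons]
        simp [h0]
      rw [this]
    · set v := pvGetf dp (n : Int) with hv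
      set nr := min e ((n : Int) + w) with hnr
      have hnr1 : 0 ≤ nr := by omega
      have hnr2 : nr ≤ e := by omega
      have hnrn : (n : Int) ≤ nr := by omega
      set dp1 := if v + t < pvGetf dp nr then PySem.List.pySetD dp nr (v + t) else dp with hdp1
      have hbody : (if PySem.List.pyGetD dp (n : Int) 0 == pvINF then dp
        else if PySem.List.pyGetD dp (n : Int) 0 + t < PySem.List.pyGetD dp (min e ((n : Int) + w)) 0
          then PySem.List.pySetD dp (min e ((n : Int) + w)) (PySem.List.pyGetD dp (n : Int) 0 + t)
          else dp) = dp1 := by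
        rw [if_neg (by simp only [beq_iff_eq]; exact h0)]
        rw [hdp1]
        rfl
      rw [hbody]
      have hlen1 : dp1.length = (e + 1).toNat := by
        rw [hdp1]; split
        · rw [PySem.List.length_pySetD]; exact hlen
        · exact hlen
      have hsame : ∀ y, 0 ≤ y → y < (n : Int) → pvGetf dp1 y = pvGetf dp y := by
        intro y hy1 hy2
        rw [hdp1]; split
        · rw [pv_getf_set e dp hlen nr hnr1 hnr2 _ y hy1 (by omega), if_neg (by omega)]
        · rfl
      have hstep : ∀ x, 0 ≤ x → x ≤ e →
          pvGetf dp1 x = pvStep e w t x (pvGetf dp x) ((n : Int), v) := by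
        intro x hx1 hx2
        unfold pvStep
        simp only [← hnr]
        rw [hdp1]
        by_cases hc : v + t < pvGetf dp nr
        · rw [if_pos hc, pv_getf_set e dp hlen nr hnr1 hnr2 _ x hx1 hx2]
          by_cases hx : nr = x
          · rw [if_pos (by omega), if_pos hx]
            have : pvGetf dp x = pvGetf dp nr := by rw [hx]
            omega
          · rw [if_neg (by omega), if_neg hx]
        · rw [if_neg hc]
          by_cases hx : nr = x
          · rw [if_pos hx]
            have : pvGetf dp x = pvGetf dp nr := by rw [hx]
            omega
          · rw [if_neg hx]
      obtain ⟨ih1, ih2⟩ := ih (by omega) dp1 hlen1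
      refine ⟨ih1, fun x hx1 hx2 => ?_⟩
      rw [ih2 x hx1 hx2]
      have hLA : pvLA dp1 ((n : Int) - 1) = pvLA dp ((n : Int) - 1) := by
        unfold pvLA
        apply List.filterMap_congr
        intro r hr
        rw [PySem.List.mem_pyRange_neg_one] at hr
        rw [hsame r (by omega) (by omega)]
      have hLAn : pvLA dp (n : Int) = ((n : Int), v) :: pvLA dp ((n : Int) - 1) := by
        unfold pvLA
        rw [PySem.List.pyRange_neg_one_cons (by omega), List.filterMap_cons]
        rw [← hv, if_neg h0]
      rw [hLA, hLAn]
      unfold pvMstep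
      rw [List.foldl_cons, hstep x hx1 hx2]

-- ---- pvOmin / pvOadd algebra ----
theorem pvOmin_none_right (a : Option Int) : pvOmin a none = a := by
  cases a <;> rfl

theorem pvOmin_assoc (a b c : Option Int) : pvOmin (pvOmin a b) c = pvOmin a (pvOmin b c) := by
  cases a <;> cases b <;> cases c <;> simp [pvOmin, min_assoc]

theorem pvOmin_idem (a : Option Int) : pvOmin a a = a := by
  cases a <;> simp [pvOmin]

theorem pvOadd_omin_left (a b c : Option Int) :
    pvOadd (pvOmin a b) c = pvOmin (pvOadd a c) (pvOadd b c) := by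
  cases a <;> cases b <;> cases c <;> simp [pvOmin, pvOadd, min_add_add_right]

theorem pvOadd_omin_right (a b c : Option Int) :
    pvOadd a (pvOmin b c) = pvOmin (pvOadd a b) (pvOadd a c) := by
  cases a <;> cases b <;> cases c <;> simp [pvOmin, pvOadd, min_add_add_left]

theorem pvM_cons (e : Int) (it : Int × Int × Int) (rest : List (Int × Int × Int)) (r : Int) :
    pvM e (it :: rest) r
      = pvOmin (pvM e rest r) ((pvM e rest (min e (r + it.2.2))).map (· + it.2.1)) := rfl

-- ---- pvOminL lemmas ----
theorem pvOminL_cons (a : Option Int) (l : List (Option Int)) :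
    pvOminL (a :: l) = pvOmin a (pvOminL l) := rfl

theorem pvOminL_allNone {α : Type} (X : List α) (f : α → Option Int)
    (h : ∀ x ∈ X, f x = none) : pvOminL (X.map f) = none := by
  induction X with
  | nil => rfl
  | cons x X ih =>
    rw [List.map_cons, pvOminL_cons, h x List.mem_cons_self,
        ih (fun y hy => h y (List.mem_cons_of_mem _ hy))]
    rfl

theorem pvOminL_single {α : Type} [DecidableEq α] (X : List α) (f : α → Option Int) (x₀ : α)
    (hmem : x₀ ∈ X) (hnone : ∀ x ∈ X, x ≠ x₀ → f x = none) : pvOminL (X.map f) = f x₀ := by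
  induction X with
  | nil => cases hmem
  | cons x X ih =>
    rw [List.map_cons, pvOminL_cons]
    by_cases hx : x = x₀
    · subst hx
      by_cases hx₀ : x ∈ X
      · rw [ih hx₀ (fun y hy hne => hnone y (List.mem_cons_of_mem _ hy) hne), pvOmin_idem]
      · rw [pvOminL_allNone X f (fun y hy => hnone y (List.mem_cons_of_mem _ hy)
          (fun he => hx₀ (he ▸ hy))), pvOmin_none_right]
    · have hx₀ : x₀ ∈ X := by
        rcases List.mem_cons.1 hmem with h | h
        · exact absurd h.symm hx
        · exact h
      rw [ih hx₀ (fun y hy hne => hnone y (List.mem_cons_of_mem _ hy) hne),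
          hnone x List.mem_cons_self hx]
      rfl

theorem pvOmin_min_d (a b d : Option Int) :
    pvOmin (pvOmin a d) (pvOmin b d) = pvOmin (pvOmin a b) d := by
  cases a <;> cases b <;> cases d <;> simp [pvOmin] <;> omega
-- (the final omega closes only the all-some goals; simp settles the rest)

theorem pvOmin_right_comm (a d b : Option Int) :
    pvOmin (pvOmin a d) b = pvOmin (pvOmin a b) d := by
  cases a <;> cases b <;> cases d <;> simp [pvOmin] <;> omega

theorem pvOmin_interchange (a b c d : Option Int) :
    pvOmin (pvOmin a b) (pvOmin c d) = pvOmin (pvOmin a c) (pvOmin b d) := by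
  cases a <;> cases b <;> cases c <;> cases d <;> simp [pvOmin] <;> omega

theorem pvOminL_split {α : Type} (X : List α) (f g : α → Option Int) :
    pvOminL (X.map (fun x => pvOmin (f x) (g x)))
      = pvOmin (pvOminL (X.map f)) (pvOminL (X.map g)) := by
  induction X with
  | nil => rfl
  | cons x X ih =>
    simp only [List.map_cons, pvOminL_cons, ih]
    rw [pvOmin_interchange]

theorem pv_pointUpdate {α : Type} [DecidableEq α] (X : List α) (f : α → Option Int)
    (x₀ : α) (d : Option Int) (hmem : x₀ ∈ X) :
    pvOminL (X.map (fun x => if x = x₀ then pvOmin (f x) d else f x))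
      = pvOmin (pvOminL (X.map f)) d := by
  induction X with
  | nil => cases hmem
  | cons x X ih =>
    simp only [List.map_cons, pvOminL_cons]
    by_cases hx : x = x₀
    · rw [if_pos hx]
      by_cases hx₀ : x₀ ∈ X
      · rw [ih hx₀, pvOmin_min_d]
      · have : (X.map (fun x => if x = x₀ then pvOmin (f x) d else f x)) = X.map f := by
          apply List.map_congr_left
          intro y hy
          rw [if_neg (by intro hEq; rw [hEq] at hy; exact hx₀ hy)]
        rw [this, pvOmin_right_comm]
    · rw [if_neg hx]
      have hx₀ : x₀ ∈ X := by
        rcases List.mem_cons.1 hmem with h | h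
        · exact absurd h.symm hx
        · exact h
      rw [ih hx₀, ← pvOmin_assoc]

-- ---- Int-with-INF fold ↔ Option fold ----
theorem pv_fold_ren (e w t x : Int) (L : List (Int × Int)) (hc : ∀ p ∈ L, p.2 + t < pvINF) :
    ∀ (a : Int) (o : Option Int), ((a = pvINF ∧ o = none) ∨ (a < pvINF ∧ o = some a)) →
    (L.foldl (pvStep e w t x) a = pvINF ∧ L.foldl (pvOstep e w t x) o = none) ∨
    (L.foldl (pvStep e w t x) a < pvINF ∧
      L.foldl (pvOstep e w t x) o = some (L.foldl (pvStep e w t x) a)) := by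
  induction L with
  | nil =>
    intro a o h
    rcases h with ⟨h1, h2⟩ | ⟨h1, h2⟩
    · exact Or.inl ⟨h1, h2⟩
    · exact Or.inr ⟨h1, by simpa using h2⟩
  | cons p L ih =>
    intro a o h
    simp only [List.foldl_cons]
    apply ih (fun q hq => hc q (List.mem_cons_of_mem _ hq))
    have hp := hc p List.mem_cons_self
    unfold pvStep pvOstep
    by_cases hcond : min e (p.1 + w) = x
    · rw [if_pos hcond, if_pos hcond]
      rcases h with ⟨h1, h2⟩ | ⟨h1, h2⟩
      · subst h1; subst h2
        right
        rw [min_eq_right hp.le]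
        exact ⟨hp, rfl⟩
      · subst h2
        right
        refine ⟨by omega, ?_⟩
        simp [pvOmin]
    · rw [if_neg hcond, if_neg hcond]; exact h

theorem pv_fold_bound (e w t x C : Int) (hC : C < pvINF) (L : List (Int × Int))
    (hc : ∀ p ∈ L, |p.2 + t| ≤ C) :
    ∀ a, (a = pvINF ∨ |a| ≤ C) →
      (L.foldl (pvStep e w t x) a = pvINF ∨ |L.foldl (pvStep e w t x) a| ≤ C) := by
  induction L with
  | nil => intro a h; exact h
  | cons p L ih =>
    intro a h
    simp only [List.foldl_cons]
    apply ih (fun q hq => hc q (List.mem_cons_of_mem _ hq))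
    have hp := hc p List.mem_cons_self
    unfold pvStep
    by_cases hcond : min e (p.1 + w) = x
    · rw [if_pos hcond]
      rcases h with h | h
      · subst h
        right
        rw [min_eq_right (le_trans (le_abs_self _) (le_of_lt (lt_of_le_of_lt hp hC)))]
        exact hp
      · right
        rcases min_choice a (p.2 + t) with hm | hm <;> rw [hm]
        · exact h
        · exact hp
    · rw [if_neg hcond]; exact h

theorem pvLA_mem (dp : List Int) (a : Int) (p : Int × Int) (hp : p ∈ pvLA dp a) :
    0 ≤ p.1 ∧ p.1 ≤ a ∧ p.2 = pvGetf dp p.1 ∧ pvGetf dp p.1 ≠ pvINF := by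
  unfold pvLA at hp
  obtain ⟨r, hr, heq⟩ := List.mem_filterMap.1 hp
  rw [PySem.List.mem_pyRange_neg_one] at hr
  by_cases h0 : pvGetf dp r = pvINF
  · rw [if_pos h0] at heq; cases heq
  · rw [if_neg h0] at heq
    obtain rfl := Option.some.inj heq
    exact ⟨by omega, by omega, rfl, h0⟩

-- ---- graph of pvG over the countdown range ----
theorem pv_graph (dp : List Int) (h : Int → Option Int) : ∀ (X : List Int),
    pvOminL (X.map (fun x => pvOadd (pvG dp x) (h x)))
      = pvOminL ((X.filterMap (fun r =>
          if pvGetf dp r = pvINF then none else some (r, pvGetf dp r))).map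
          (fun p => pvOadd (some p.2) (h p.1))) := by
  intro X
  induction X with
  | nil => rfl
  | cons x X ih =>
    rw [List.map_cons, pvOminL_cons, List.filterMap_cons]
    by_cases h0 : pvGetf dp x = pvINF
    · rw [if_pos h0]
      have : pvG dp x = none := by unfold pvG; rw [if_pos h0]
      rw [this]
      have hnone : pvOadd none (h x) = none := by cases h x <;> rfl
      rw [hnone, ← ih]
      rfl
    · rw [if_neg h0]
      have : pvG dp x = some (pvGetf dp x) := by unfold pvG; rw [if_neg h0]
      rw [this, List.map_cons, pvOminL_cons, ih]

theorem pvOadd_some_map (v t : Int) (m : Option Int) :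
    pvOadd (some v) (m.map (· + t)) = pvOadd (some (v + t)) m := by
  cases m <;> simp [pvOadd] <;> ring

-- ---- accumulating a whole item's updates ----
theorem pv_foldUpd (e w t : Int) (he : 0 ≤ e) (hw : 0 ≤ w) :
    ∀ (L : List (Int × Int)) (g h : Int → Option Int), (∀ p ∈ L, 0 ≤ p.1) →
    pvOminL ((PySem.List.pyRange e (-1) (-1)).map
        (fun x => pvOadd (L.foldl (pvOstep e w t x) (g x)) (h x)))
      = pvOmin
          (pvOminL ((PySem.List.pyRange e (-1) (-1)).map (fun x => pvOadd (g x) (h x))))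
          (pvOminL (L.map (fun p => pvOadd (some (p.2 + t)) (h (min e (p.1 + w)))))) := by
  intro L
  induction L with
  | nil =>
    intro g h _
    simp only [List.foldl_nil, List.map_nil]
    have hnil : pvOminL ([] : List (Option Int)) = none := rfl
    rw [hnil, pvOmin_none_right]
  | cons p L ih =>
    intro g h hpos
    have hp := hpos p List.mem_cons_self
    simp only [List.foldl_cons]
    rw [ih (fun x => pvOstep e w t x (g x) p) h
      (fun q hq => hpos q (List.mem_cons_of_mem _ hq))]
    have hcongr : (PySem.List.pyRange e (-1) (-1)).map
        (fun x => pvOadd (pvOstep e w t x (g x) p) (h x))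
      = (PySem.List.pyRange e (-1) (-1)).map
        (fun x => if x = min e (p.1 + w)
          then pvOmin (pvOadd (g x) (h x)) (pvOadd (some (p.2 + t)) (h (min e (p.1 + w))))
          else pvOadd (g x) (h x)) := by
      apply List.map_congr_left
      intro x _
      unfold pvOstep
      by_cases hx : min e (p.1 + w) = x
      · rw [if_pos hx, if_pos hx.symm, pvOadd_omin_left, hx]
      · rw [if_neg hx, if_neg (fun hh => hx hh.symm)]
    rw [hcongr, pv_pointUpdate _ _ _ _ (by
      rw [PySem.List.mem_pyRange_neg_one]
      omega)]
    rw [List.map_cons, pvOminL_cons, ← pvOmin_assoc, pvOmin_right_comm, pvOmin_assoc]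

-- ---- per-item step of the meet ----
theorem pv_item_step (e : Int) (it : Int × Int × Int) (B : Int) (he : 0 ≤ e)
    (hw : 0 ≤ it.2.2) (hB0 : 0 ≤ B) (hBt : B + |it.2.1| < pvINF)
    (dp : List Int) (hlen : dp.length = (e + 1).toNat)
    (hB : ∀ x, 0 ≤ x → x ≤ e → pvGetf dp x = pvINF ∨ |pvGetf dp x| ≤ B)
    (rest : List (Int × Int × Int)) :
    ((PySem.List.pyRange e (-1) (-1)).foldl (fun dp r =>
      if PySem.List.pyGetD dp r 0 == pvINF then dp
      else
        if PySem.List.pyGetD dp r 0 + it.2.1 < PySem.List.pyGetD dp (min e (r + it.2.2)) 0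
        then PySem.List.pySetD dp (min e (r + it.2.2)) (PySem.List.pyGetD dp r 0 + it.2.1)
        else dp) dp).length = (e + 1).toNat ∧
    (∀ x, 0 ≤ x → x ≤ e →
      pvGetf ((PySem.List.pyRange e (-1) (-1)).foldl (fun dp r =>
        if PySem.List.pyGetD dp r 0 == pvINF then dp
        else
          if PySem.List.pyGetD dp r 0 + it.2.1 < PySem.List.pyGetD dp (min e (r + it.2.2)) 0
          then PySem.List.pySetD dp (min e (r + it.2.2)) (PySem.List.pyGetD dp r 0 + it.2.1)
          else dp) dp) x = pvINF ∨
      |pvGetf ((PySem.List.pyRange e (-1) (-1)).foldl (fun dp r =>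
        if PySem.List.pyGetD dp r 0 == pvINF then dp
        else
          if PySem.List.pyGetD dp r 0 + it.2.1 < PySem.List.pyGetD dp (min e (r + it.2.2)) 0
          then PySem.List.pySetD dp (min e (r + it.2.2)) (PySem.List.pyGetD dp r 0 + it.2.1)
          else dp) dp) x| ≤ B + |it.2.1|) ∧
    pvAns e rest ((PySem.List.pyRange e (-1) (-1)).foldl (fun dp r =>
      if PySem.List.pyGetD dp r 0 == pvINF then dp
      else
        if PySem.List.pyGetD dp r 0 + it.2.1 < PySem.List.pyGetD dp (min e (r + it.2.2)) 0
        then PySem.List.pySetD dp (min e (r + it.2.2)) (PySem.List.pyGetD dp r 0 + it.2.1)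
        else dp) dp) = pvAns e (it :: rest) dp := by
  have hcast : e = ((e.toNat + 1 : Nat) : Int) - 1 := by omega
  obtain ⟨ha1, ha2⟩ := pv_a_round e it.2.2 it.2.1 hw (e.toNat + 1) (by omega) dp hlen
  rw [← hcast] at ha1 ha2
  -- contributions of the current item: entries of pvLA dp e
  have hLmem : ∀ p ∈ pvLA dp e, 0 ≤ p.1 ∧ p.1 ≤ e ∧ p.2 = pvGetf dp p.1 ∧ |p.2| ≤ B := by
    intro p hp
    obtain ⟨h1, h2, h3, h4⟩ := pvLA_mem dp e p hp
    have := hB p.1 h1 h2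
    exact ⟨h1, h2, h3, by rw [h3]; omega⟩
  have hcand : ∀ p ∈ pvLA dp e, p.2 + it.2.1 < pvINF := by
    intro p hp
    have := (hLmem p hp).2.2.2
    have := abs_add_le p.2 it.2.1
    have h1 : |p.2 + it.2.1| ≤ B + |it.2.1| := by
      calc |p.2 + it.2.1| ≤ |p.2| + |it.2.1| := abs_add_le _ _
        _ ≤ B + |it.2.1| := by omega
    have h2 := le_abs_self (p.2 + it.2.1)
    omega
  have hcandB : ∀ p ∈ pvLA dp e, |p.2 + it.2.1| ≤ B + |it.2.1| := by
    intro p hp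
    have := (hLmem p hp).2.2.2
    calc |p.2 + it.2.1| ≤ |p.2| + |it.2.1| := abs_add_le _ _
      _ ≤ B + |it.2.1| := by omega
  -- the option-level characterisation of pvG after the sweep
  have hGchar : ∀ x, 0 ≤ x → x ≤ e →
      pvG ((PySem.List.pyRange e (-1) (-1)).foldl (fun dp r =>
        if PySem.List.pyGetD dp r 0 == pvINF then dp
        else
          if PySem.List.pyGetD dp r 0 + it.2.1 < PySem.List.pyGetD dp (min e (r + it.2.2)) 0
          then PySem.List.pySetD dp (min e (r + it.2.2)) (PySem.List.pyGetD dp r 0 + it.2.1)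
          else dp) dp) x
      = (pvLA dp e).foldl (pvOstep e it.2.2 it.2.1 x) (pvG dp x) := by
    intro x hx1 hx2
    have hR : (pvGetf dp x = pvINF ∧ pvG dp x = none) ∨
        (pvGetf dp x < pvINF ∧ pvG dp x = some (pvGetf dp x)) := by
      by_cases h0 : pvGetf dp x = pvINF
      · exact Or.inl ⟨h0, by unfold pvG; rw [if_pos h0]⟩
      · have h1 := hB x hx1 hx2
        have h2 := le_abs_self (pvGetf dp x)
        have h3 := abs_nonneg it.2.1
        exact Or.inr ⟨by omega, by unfold pvG; rw [if_neg h0]⟩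
    have hfr := pv_fold_ren e it.2.2 it.2.1 x (pvLA dp e) hcand (pvGetf dp x) (pvG dp x) hR
    rcases hfr with ⟨h1, h2⟩ | ⟨h1, h2⟩
    · rw [h2]
      unfold pvG
      rw [ha2 x hx1 hx2]
      unfold pvMstep
      rw [if_pos h1]
    · rw [h2]
      unfold pvG
      rw [ha2 x hx1 hx2]
      unfold pvMstep
      rw [if_neg (by omega)]
  refine ⟨ha1, ?_, ?_⟩
  · intro x hx1 hx2
    rw [ha2 x hx1 hx2]
    unfold pvMstep
    apply pv_fold_bound e it.2.2 it.2.1 x (B + |it.2.1|) hBt (pvLA dp e) hcandB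
    rcases hB x hx1 hx2 with h | h
    · exact Or.inl h
    · have := abs_nonneg it.2.1
      right
      omega
  · -- the meet equality
    unfold pvAns
    have hmapG : (PySem.List.pyRange e (-1) (-1)).map (fun x =>
        pvOadd (pvG ((PySem.List.pyRange e (-1) (-1)).foldl (fun dp r =>
          if PySem.List.pyGetD dp r 0 == pvINF then dp
          else
            if PySem.List.pyGetD dp r 0 + it.2.1 < PySem.List.pyGetD dp (min e (r + it.2.2)) 0
            then PySem.List.pySetD dp (min e (r + it.2.2)) (PySem.List.pyGetD dp r 0 + it.2.1)
            else dp) dp) x) (pvM e rest x))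
      = (PySem.List.pyRange e (-1) (-1)).map (fun x =>
          pvOadd ((pvLA dp e).foldl (pvOstep e it.2.2 it.2.1 x) (pvG dp x)) (pvM e rest x)) := by
      apply List.map_congr_left
      intro x hx
      rw [PySem.List.mem_pyRange_neg_one] at hx
      rw [hGchar x (by omega) (by omega)]
    rw [hmapG, pv_foldUpd e it.2.2 it.2.1 he hw (pvLA dp e) (pvG dp) (pvM e rest)
      (fun p hp => (pvLA_mem dp e p hp).1)]
    -- now expand the (it :: rest) side
    have hmapM : (PySem.List.pyRange e (-1) (-1)).map (fun x =>
        pvOadd (pvG dp x) (pvM e (it :: rest) x))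
      = (PySem.List.pyRange e (-1) (-1)).map (fun x =>
          pvOmin (pvOadd (pvG dp x) (pvM e rest x))
            (pvOadd (pvG dp x) ((pvM e rest (min e (x + it.2.2))).map (· + it.2.1)))) := by
      apply List.map_congr_left
      intro x _
      rw [pvM_cons, pvOadd_omin_right]
    rw [hmapM, pvOminL_split]
    congr 1
    rw [pv_graph dp (fun x => (pvM e rest (min e (x + it.2.2))).map (· + it.2.1))]
    show pvOminL ((pvLA dp e).map _) = pvOminL ((pvLA dp e).map _)
    congr 1
    apply List.map_congr_left
    intro p _
    rw [pvOadd_some_map]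

-- ---- folding the meet over all items ----
theorem pv_meet (e : Int) (he : 0 ≤ e) :
    ∀ (rest : List (Int × Int × Int)) (dp : List Int) (B : Int),
    dp.length = (e + 1).toNat → (∀ p ∈ rest, 0 ≤ p.2.2) → 0 ≤ B →
    B + pvS rest < pvINF →
    (∀ x, 0 ≤ x → x ≤ e → pvGetf dp x = pvINF ∨ |pvGetf dp x| ≤ B) →
    pvAns e [] (rest.foldl (fun dp item =>
      (PySem.List.pyRange e (-1) (-1)).foldl (fun dp r =>
        if PySem.List.pyGetD dp r 0 == pvINF then dp
        else
          if PySem.List.pyGetD dp r 0 + item.2.1 < PySem.List.pyGetD dp (min e (r + item.2.2)) 0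
          then PySem.List.pySetD dp (min e (r + item.2.2)) (PySem.List.pyGetD dp r 0 + item.2.1)
          else dp) dp) dp) = pvAns e rest dp := by
  intro rest
  induction rest with
  | nil => intro dp B _ _ _ _ _; rfl
  | cons it rest ih =>
    intro dp B hlen hw hB0 hBS hB
    have hScons : pvS (it :: rest) = |it.2.1| + pvS rest := by simp [pvS]
    have hSnn : 0 ≤ pvS rest := by
      unfold pvS
      apply List.sum_nonneg
      intro x hx
      obtain ⟨p, _, rfl⟩ := List.mem_map.1 hx
      exact abs_nonneg _
    have hBt : B + |it.2.1| < pvINF := by omega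
    obtain ⟨h1, h2, h3⟩ := pv_item_step e it B he (hw it List.mem_cons_self) hB0 hBt dp hlen hB rest
    simp only [List.foldl_cons]
    rw [ih _ (B + |it.2.1|) h1 (fun p hp => hw p (List.mem_cons_of_mem _ hp))
      (by have := abs_nonneg it.2.1; omega) (by omega) h2, h3]

-- ---- base cases of the meet ----
theorem pvOadd_none_right (a : Option Int) : pvOadd a none = none := by cases a <;> rfl

theorem pvAns_nil (e : Int) (he : 0 ≤ e) (dp : List Int) : pvAns e [] dp = pvG dp e := by
  unfold pvAns
  rw [pvOminL_single (PySem.List.pyRange e (-1) (-1)) _ e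
    (by rw [PySem.List.mem_pyRange_neg_one]; omega)
    (by
      intro x _ hx
      have : pvM e [] x = none := by unfold pvM; rw [if_neg hx]
      rw [this, pvOadd_none_right])]
  have : pvM e [] e = some 0 := by unfold pvM; rw [if_pos rfl]
  rw [this]
  cases h : pvG dp e <;> simp [pvOadd]

theorem pv_init_len (e : Int) :
    (PySem.List.pySetD (PySem.List.pyRepeat [pvINF] (e + 1)) 0 0).length = (e + 1).toNat := by
  rw [PySem.List.length_pySetD, PySem.List.pyRepeat_singleton, List.length_replicate]

theorem pv_init_getf (e : Int) (he : 0 ≤ e) (x : Int) (hx1 : 0 ≤ x) (hx2 : x ≤ e) :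
    pvGetf (PySem.List.pySetD (PySem.List.pyRepeat [pvINF] (e + 1)) 0 0) x
      = if x = 0 then 0 else pvINF := by
  unfold pvGetf
  rw [PySem.List.pyRepeat_singleton, PySem.List.pySetD_of_nonneg _ _ (le_refl 0),
      PySem.List.pyGetD_eq_getElem _ _ hx1 (by simp; omega)]
  rw [List.getElem_set]
  by_cases hx : x = 0
  · rw [if_pos (by omega), if_pos hx]
  · rw [if_neg (by omega), if_neg hx, List.getElem_replicate]

theorem pvAns_init (e : Int) (he : 0 ≤ e) (ct : List (Int × Int × Int)) :
    pvAns e ct (PySem.List.pySetD (PySem.List.pyRepeat [pvINF] (e + 1)) 0 0) = pvM e ct 0 := by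
  unfold pvAns
  rw [pvOminL_single (PySem.List.pyRange e (-1) (-1)) _ 0
    (by rw [PySem.List.mem_pyRange_neg_one]; omega)
    (by
      intro x hx hx0
      rw [PySem.List.mem_pyRange_neg_one] at hx
      have h1 : pvG (PySem.List.pySetD (PySem.List.pyRepeat [pvINF] (e + 1)) 0 0) x = none := by
        unfold pvG
        rw [pv_init_getf e he x (by omega) (by omega), if_neg hx0, if_pos rfl]
      rw [h1]
      cases pvM e ct x <;> rfl)]
  have h0 : pvG (PySem.List.pySetD (PySem.List.pyRepeat [pvINF] (e + 1)) 0 0) 0 = some 0 := by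
    unfold pvG
    rw [pv_init_getf e he 0 (le_refl 0) he, if_pos rfl, if_neg (by norm_num [pvINF])]
  rw [h0]
  cases pvM e ct 0 <;> simp [pvOadd]

theorem pv_ren_G (dp : List Int) (x : Int) : pvRen (pvG dp x) = pvGetf dp x := by
  unfold pvRen pvG
  split
  · simp [*]
  · rfl

-- ---- A's port computes pvRen (pvM e ct 0) ----
theorem pv_A_eq (ct : List (Int × Int × Int)) (e : Int) (he : 0 ≤ e)
    (hw : ∀ p ∈ ct, 0 ≤ p.2.2) (hS : pvS ct < pvINF) :
    calculate_minimum_essence_time ct e = pvRen (pvM e ct 0) := by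
  have hmeet := pv_meet e he ct (PySem.List.pySetD (PySem.List.pyRepeat [pvINF] (e + 1)) 0 0) 0
    (pv_init_len e) hw (le_refl 0) (by omega)
    (by
      intro x hx1 hx2
      rw [pv_init_getf e he x hx1 hx2]
      by_cases hx : x = 0
      · rw [if_pos hx]; right; simp
      · rw [if_neg hx]; left; rfl)
  rw [pvAns_init e he ct] at hmeet
  have := (pv_ren_G _ e).symm.trans (congrArg pvRen ((pvAns_nil e he _).symm.trans hmeet))
  exact this

-- ---- B-side: bounds on pvM and memo soundness ----
theorem pvS_append (a b : List (Int × Int × Int)) : pvS (a ++ b) = pvS a + pvS b := by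
  simp [pvS]

theorem pvS_nonneg (l : List (Int × Int × Int)) : 0 ≤ pvS l := by
  unfold pvS
  apply List.sum_nonneg
  intro x hx
  obtain ⟨p, _, rfl⟩ := List.mem_map.1 hx
  exact abs_nonneg _

theorem pvS_drop_le (l : List (Int × Int × Int)) (i : Nat) : pvS (l.drop i) ≤ pvS l := by
  conv_rhs => rw [← List.take_append_drop i l]
  rw [pvS_append]
  have := pvS_nonneg (l.take i)
  omega

theorem pvM_bound (e : Int) :
    ∀ (l : List (Int × Int × Int)) (r c : Int), pvM e l r = some c → |c| ≤ pvS l := by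
  intro l
  induction l with
  | nil =>
    intro r c h
    unfold pvM at h
    split at h
    · obtain rfl := Option.some.inj h
      simp [pvS]
    · cases h
  | cons it rest ih =>
    intro r c h
    rw [pvM_cons] at h
    have hScons : pvS (it :: rest) = |it.2.1| + pvS rest := by simp [pvS]
    cases h1 : pvM e rest r <;> cases h2 : pvM e rest (min e (r + it.2.2)) <;>
      rw [h1, h2] at h <;> simp [pvOmin] at h
    · rename_i k
      obtain rfl := h.symm
      have hk := ih _ _ h2
      have := abs_add_le k it.2.1
      have := abs_nonneg it.2.1
      rw [hScons]
      omega
    · rename_i s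
      obtain rfl := h.symm
      have hs := ih _ _ h1
      have := abs_nonneg it.2.1
      rw [hScons]
      omega
    · rename_i s k
      obtain rfl := h.symm
      have hs := ih _ _ h1
      have hk := ih _ _ h2
      have := abs_add_le k it.2.1
      have := abs_nonneg it.2.1
      rcases min_choice s (k + it.2.1) with hmin | hmin <;> rw [hmin] <;> rw [hScons] <;> omega

def pvGood (ct : List (Int × Int × Int)) (e : Int) (memo : PySem.Dict (Nat × Int) Int) : Prop :=
  ∀ (i : Nat) (r v : Int), memo.get? (i, r) = some v → v = pvRen (pvM e (ct.drop i) r)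

theorem pvBestB_sound (ct : List (Int × Int × Int)) (e : Int) (hS : pvS ct < pvINF) :
    ∀ (k i : Nat), ct.length - i = k → ∀ (r : Int) (memo : PySem.Dict (Nat × Int) Int),
    pvGood ct e memo →
    (pvBestB ct e pvINF i r memo).1 = pvRen (pvM e (ct.drop i) r) ∧
    pvGood ct e (pvBestB ct e pvINF i r memo).2 := by
  intro k
  induction k with
  | zero =>
    intro i hi r memo hgood
    rw [pvBestB, dif_neg (by omega)]
    have hdrop : ct.drop i = [] := List.drop_eq_nil_of_le (by omega)
    rw [hdrop]
    constructor
    · show (if r == e then (0 : Int) else pvINF) = pvRen (pvM e [] r)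
      unfold pvM pvRen
      by_cases hr : r = e
      · rw [if_pos (by simpa using hr), if_pos hr]; rfl
      · rw [if_neg (by simpa using hr), if_neg hr]; rfl
    · exact hgood
  | succ k ihk =>
    intro i hi r memo hgood
    have h : i < ct.length := by omega
    rw [pvBestB, dif_pos h]
    cases hm : memo.get? (i, r) with
    | some v =>
      simp only
      exact ⟨hgood i r v hm, hgood⟩
    | none =>
      simp only
      obtain ⟨hp1, hg1⟩ := ihk (i + 1) (by omega) r memo hgood
      obtain ⟨hp2, hg2⟩ := ihk (i + 1) (by omega) (min e (r + ct[i].2.2))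
        (pvBestB ct e pvINF (i + 1) r memo).2 hg1
      have hdrop : ct.drop i = ct[i] :: ct.drop (i + 1) := List.drop_eq_getElem_cons h
      have hScons : pvS (ct.drop i) = |ct[i].2.1| + pvS (ct.drop (i + 1)) := by
        rw [hdrop]
        unfold pvS
        rw [List.map_cons, List.sum_cons]
      have hSle : |ct[i].2.1| + pvS (ct.drop (i + 1)) ≤ pvS ct := by
        rw [← hScons]; exact pvS_drop_le ct i
      have hres : (if (pvBestB ct e pvINF (i + 1) (min e (r + ct[i].2.2))
            (pvBestB ct e pvINF (i + 1) r memo).2).1 < pvINF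
          then min (pvBestB ct e pvINF (i + 1) r memo).1
            ((pvBestB ct e pvINF (i + 1) (min e (r + ct[i].2.2))
              (pvBestB ct e pvINF (i + 1) r memo).2).1 + ct[i].2.1)
          else (pvBestB ct e pvINF (i + 1) r memo).1)
          = pvRen (pvM e (ct.drop i) r) := by
        rw [hp1, hp2, hdrop, pvM_cons]
        cases hA : pvM e (ct.drop (i + 1)) r with
        | none =>
          cases hB : pvM e (ct.drop (i + 1)) (min e (r + ct[i].2.2)) with
          | none =>
            rw [if_neg (by unfold pvRen; simp)]
            rfl
          | some kk =>
            have hkb := pvM_bound e _ _ _ hB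
            have hk1 := le_abs_self kk
            have hk2 := abs_nonneg (ct[i].2.1)
            have hklt : kk < pvINF := by omega
            have hkp : kk + ct[i].2.1 ≤ pvINF := by
              have h3 := abs_add_le kk (ct[i].2.1)
              have h4 := le_abs_self (kk + ct[i].2.1)
              omega
            rw [if_pos (by unfold pvRen; simpa using hklt)]
            have hR : pvRen (pvOmin none (Option.map (fun x => x + ct[i].2.1) (some kk)))
                = kk + ct[i].2.1 := rfl
            rw [hR]
            have h0 : pvRen none = pvINF := rfl
            have h1 : pvRen (some kk) = kk := rfl
            rw [h0, h1]
            exact min_eq_right hkp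
        | some ss =>
          cases hB : pvM e (ct.drop (i + 1)) (min e (r + ct[i].2.2)) with
          | none =>
            rw [if_neg (by unfold pvRen; simp)]
            rfl
          | some kk =>
            have hkb := pvM_bound e _ _ _ hB
            have hk1 := le_abs_self kk
            have hk2 := abs_nonneg (ct[i].2.1)
            have hklt : kk < pvINF := by omega
            rw [if_pos (by unfold pvRen; simpa using hklt)]
            rfl
      refine ⟨hres, ?_⟩
      intro j s v hv
      rw [PySem.Dict.get?_insert] at hv
      split at hv
      · rename_i hjs
        have hj : j = i := congrArg Prod.fst hjs
        have hs : s = r := congrArg Prod.snd hjs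
        subst hj; subst hs
        rw [← Option.some.inj hv]
        exact hres
      · exact hg2 j s v hv

theorem pv_B_eq (ct : List (Int × Int × Int)) (e : Int) (hS : pvS ct < pvINF) :
    calculate_minimum_essence_time_alt ct e = pvRen (pvM e ct 0) := by
  have hgood : pvGood ct e PySem.Dict.empty := by
    intro i r v h
    rw [PySem.Dict.get?_empty] at h
    cases h
  have := (pvBestB_sound ct e hS (ct.length - 0) 0 rfl 0 PySem.Dict.empty hgood).1
  rw [List.drop_zero] at this
  exact this

-- ===== VERDICT (by name: the statement is the Claim_ definition above) =====
theorem calculate_minimum_essence_time_spec : Claim_equal_calculate_minimum_essence_time := by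
  intro ct e _ hpre
  obtain ⟨he, hw, hS⟩ := hpre
  show calculate_minimum_essence_time ct e = calculate_minimum_essence_time_alt ct e
  rw [pv_A_eq ct e he hw hS, pv_B_eq ct e hS]
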